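-- pv_equiv track=rewrite | github.com/bbbales2/regressions | rat/exceptions.py | find_line_and_relative_position
-- ===== SOURCE A (Python) =====
-- def find_line_and_relative_position(text : str, target_position : int) -> int:
--     """
--     Reinterpret target_position (given as an absolute offset in a block of text)
--     as a line number and relative offset
--     """
--     if target_position > len(text):
--         raise ValueError(f"Internal error: target_position {target_position} must be less than text length {len(text)}")
--
--     line_start = 0
--     for line_number, line in enumerate(text.split("\n")):
--         line_end = line_start + len(line)
--         if line_end >= target_position:
--             return line_number, target_position - line_start
--         line_start = line_end + 1
--     else:
--         raise ValueError("Internal error: Failed to find line number")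
-- ===== SOURCE B (Python) =====
-- def find_line_and_relative_position(text : str, target_position : int) -> int:
--     """
--     Reinterpret target_position (given as an absolute offset in a block of text)
--     as a line number and relative offset
--     """
--     if target_position > len(text):
--         raise ValueError(f"Internal error: target_position {target_position} must be less than text length {len(text)}")
--
--     prefix = text[:max(target_position, 0)]
--     line_number = prefix.count("\n")
--     line_start = prefix.rfind("\n") + 1
--     return line_number, target_position - line_start
-- ===== Notes on version B (the rewrite author's own statement) =====
-- stated objective: alternative
-- what changed: A splits the text into lines and scans them with enumerate accumulating line_start; B does no splitting at all and computes the line number as prefix.count('\n') and the line start as prefix.rfind('\n')+1 on the clamped prefix text[:max(target_position,0)].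
import Mathlib
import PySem

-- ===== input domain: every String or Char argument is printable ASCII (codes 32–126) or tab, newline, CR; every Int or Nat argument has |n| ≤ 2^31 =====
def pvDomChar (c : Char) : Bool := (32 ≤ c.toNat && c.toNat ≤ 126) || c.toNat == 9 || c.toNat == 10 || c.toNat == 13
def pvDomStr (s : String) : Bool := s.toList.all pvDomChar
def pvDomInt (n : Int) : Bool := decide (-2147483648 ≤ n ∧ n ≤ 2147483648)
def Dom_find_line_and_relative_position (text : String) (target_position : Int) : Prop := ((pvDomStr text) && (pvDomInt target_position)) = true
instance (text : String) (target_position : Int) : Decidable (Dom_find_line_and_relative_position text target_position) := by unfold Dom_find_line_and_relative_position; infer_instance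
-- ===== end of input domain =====

-- B replaces A's line-splitting enumerate loop by two prefix-bounded string searches
-- (count/rfind on text[:max(target_position,0)]); objective: alternative decomposition.


-- B replaces A's split("\n")+enumerate line scan by two prefix-bounded searches on text[:max(target_position,0)]
-- (count of '\n' and rfind of '\n'); objective: alternative decomposition, same exact return value.
-- ===== PORT A =====
-- the for-loop over enumerate(text.split("\n")) carrying line_start;
-- the [] case is Python's trailing 'raise ValueError' (unreachable under Pre_)
def pvLoopA : List (Int × List Char) → Int → Int → Int × Int
  | [], _, _ => (0, 0)
  | (line_number, line) :: rest, line_start, t =>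
      let line_end := line_start + (line.length : Int)
      if line_end ≥ t then (line_number, t - line_start)
      else pvLoopA rest (line_end + 1) t

def find_line_and_relative_position (text : String) (target_position : Int) : Int × Int :=
  -- 'if target_position > len(text): raise ValueError(...)' is excluded by Pre_
  pvLoopA (PySem.List.enumerate (PySem.Chars.splitOn text.toList ['\n']) 0) 0 target_position

-- ===== PORT B =====
def find_line_and_relative_position_alt (text : String) (target_position : Int) : Int × Int :=
  -- prefix = text[:max(target_position, 0)]; result = (prefix.count("\n"), target_position - (prefix.rfind("\n") + 1));
  -- the same guard 'target_position > len(text): raise' is excluded by Pre_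
  ((PySem.Chars.count (PySem.List.slice text.toList none (some (max target_position 0))) ['\n'] : Int),
   target_position - (PySem.Chars.rfind (PySem.List.slice text.toList none (some (max target_position 0))) ['\n'] + 1))

-- ===== PRECONDITION & SPEC =====
-- Pre_ excludes exactly the inputs where A raises ValueError: target_position > len(text)
def Pre_find_line_and_relative_position (text : String) (target_position : Int) : Prop :=
  target_position ≤ (text.toList.length : Int)
instance (text : String) (target_position : Int) : Decidable (Pre_find_line_and_relative_position text target_position) := by unfold Pre_find_line_and_relative_position; infer_instance
def pvWitness_find_line_and_relative_position : String × Int := ("ab\ncd", 4)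

def Spec_find_line_and_relative_position (text : String) (target_position : Int) (out : Int × Int) : Prop := out = find_line_and_relative_position_alt text target_position
instance (text : String) (target_position : Int) (out : Int × Int) : Decidable (Spec_find_line_and_relative_position text target_position out) := by unfold Spec_find_line_and_relative_position; infer_instance

-- ===== CLAIM (what is proved, stated in full; the proofs are below) =====
def Claim_equal_find_line_and_relative_position : Prop := ∀ (text : String) (target_position : Int), Dom_find_line_and_relative_position text target_position → Pre_find_line_and_relative_position text target_position → Spec_find_line_and_relative_position text target_position (find_line_and_relative_position text target_position)

-- ===== LEMMAS AND PROOFS =====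

-- reference function: line/offset of position t by one char-by-char recursion
def pvG : List Char → Int → Int × Int
  | [], t => (0, t)
  | a :: rest, t =>
    if t ≤ 0 then (0, t)
    else
      let p := pvG rest (t - 1)
      if a = '\n' then (p.1 + 1, p.2) else (p.1, if p.1 = 0 then p.2 + 1 else p.2)

-- structural form of splitOn for a single-char separator, with the current-piece accumulator
def pvMySplit (c : Char) : List Char → List Char → List (List Char)
  | [], cur => [cur.reverse]
  | a :: t, cur => if a = c then cur.reverse :: pvMySplit c t [] else pvMySplit c t (a :: cur)

lemma splitOn_go_single (c : Char) :
    ∀ (fuel : Nat) (l cur : List Char) (accs : List (List Char)),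
      l.length + 1 ≤ fuel →
      PySem.Chars.splitOn.go [c] fuel l cur accs = accs.reverse ++ pvMySplit c l cur := by
  intro fuel
  induction fuel with
  | zero => intro l cur accs h; omega
  | succ n ih =>
    intro l cur accs h
    cases l with
    | nil => simp [PySem.Chars.splitOn.go, pvMySplit]
    | cons a t =>
      by_cases hac : a = c
      · simp only [PySem.Chars.splitOn.go, List.isPrefixOf, hac, beq_self_eq_true, Bool.and_self,
          if_true, List.length_cons, List.drop_succ_cons, List.drop_zero, List.length_nil]
        rw [ih t [] (cur.reverse :: accs) (by simp at h ⊢; omega)]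
        simp [pvMySplit, hac]
      · simp only [PySem.Chars.splitOn.go, List.isPrefixOf]
        have : (c == a) = false := by simp [Ne.symm hac]
        simp only [this, Bool.false_and, if_false]
        rw [ih t (a :: cur) accs (by simp at h ⊢; omega)]
        simp [pvMySplit, hac]

lemma splitOn_single (c : Char) (l : List Char) :
    PySem.Chars.splitOn l [c] = pvMySplit c l [] := by
  rw [PySem.Chars.splitOn, splitOn_go_single c (l.length + 1) l [] [] (by omega)]
  simp

lemma count_go_single (c : Char) :
    ∀ (fuel : Nat) (l : List Char) (acc : Nat), l.length ≤ fuel →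
      PySem.Chars.count.go [c] fuel l acc = acc + l.count c := by
  intro fuel
  induction fuel with
  | zero => intro l acc h; interval_cases hl : l.length; simp_all [PySem.Chars.count.go, List.length_eq_zero_iff.mp hl]
  | succ n ih =>
    intro l acc h
    cases l with
    | nil => simp [PySem.Chars.count.go]
    | cons a t =>
      by_cases hac : a = c
      · simp only [PySem.Chars.count.go, List.isPrefixOf, hac, beq_self_eq_true, Bool.and_self,
          if_true, List.length_cons, List.drop_succ_cons, List.drop_zero, List.length_nil]
        rw [ih t (acc+1) (by simp at h; omega)]
        simp [List.count_cons, hac]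
        omega
      · simp only [PySem.Chars.count.go, List.isPrefixOf]
        have : (c == a) = false := by simp [Ne.symm hac]
        simp only [this, Bool.false_and, if_false]
        rw [ih t acc (by simp at h; omega)]
        simp [List.count_cons, hac]

lemma count_single (c : Char) (l : List Char) :
    PySem.Chars.count l [c] = l.count c := by
  rw [PySem.Chars.count]
  simp [count_go_single c l.length l 0 le_rfl]

lemma rfind_nil (c : Char) : PySem.Chars.rfind [] [c] = -1 := by
  simp [PySem.Chars.rfind, PySem.Chars.rfind.go, List.isPrefixOf]

lemma rfind_go_succ (c a : Char) (l : List Char) :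
    ∀ (n : Nat),
      PySem.Chars.rfind.go (a :: l) [c] (n + 1) =
        if 0 ≤ PySem.Chars.rfind.go l [c] n then PySem.Chars.rfind.go l [c] n + 1
        else if a = c then 0 else -1 := by
  intro n
  induction n with
  | zero =>
    simp only [PySem.Chars.rfind.go, List.drop_succ_cons, List.drop_zero]
    by_cases hp : [c].isPrefixOf l = true
    · simp [hp]
    · simp only [hp, Bool.false_eq_true, if_false]
      by_cases hac : a = c
      · simp [hac]
      · have : (c == a) = false := by simp [Ne.symm hac]
        simp [List.isPrefixOf, this, hac]
  | succ m ih =>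
    have e1 : PySem.Chars.rfind.go (a :: l) [c] (m + 1 + 1) =
        if [c].isPrefixOf (List.drop (m + 1) l) = true then ((m : Int) + 1 + 1)
        else PySem.Chars.rfind.go (a :: l) [c] (m + 1) := by
      simp only [PySem.Chars.rfind.go, List.drop_succ_cons]
      push_cast; ring_nf
    have e2 : PySem.Chars.rfind.go l [c] (m + 1) =
        if [c].isPrefixOf (List.drop (m + 1) l) = true then ((m : Int) + 1)
        else PySem.Chars.rfind.go l [c] m := by
      simp only [PySem.Chars.rfind.go]
      push_cast; ring_nf
    rw [e1, e2]
    by_cases hp : [c].isPrefixOf (List.drop (m + 1) l) = true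
    · simp only [hp, if_true]
      rw [if_pos (by positivity)]
    · simp only [hp, Bool.false_eq_true, if_false]
      exact ih

lemma rfind_cons (c a : Char) (l : List Char) :
    PySem.Chars.rfind (a :: l) [c] =
      if 0 ≤ PySem.Chars.rfind l [c] then PySem.Chars.rfind l [c] + 1
      else if a = c then 0 else -1 := by
  have : PySem.Chars.rfind (a :: l) [c] = PySem.Chars.rfind.go (a :: l) [c] (l.length + 1) := by
    simp [PySem.Chars.rfind]
  rw [this, rfind_go_succ c a l l.length]
  rfl

lemma rfind_dichotomy (c : Char) (l : List Char) :
    (PySem.Chars.rfind l [c] = -1 ∧ c ∉ l) ∨ (0 ≤ PySem.Chars.rfind l [c] ∧ c ∈ l) := by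
  induction l with
  | nil => left; simp [rfind_nil]
  | cons a t ih =>
    rw [rfind_cons]
    rcases ih with ⟨h1, h2⟩ | ⟨h1, h2⟩
    · rw [h1]
      by_cases hac : a = c
      · right; simp [hac, h1]
      · left; simp [h1, hac, h2, Ne.symm hac]
    · right
      constructor
      · rw [if_pos h1]; omega
      · simp [h2]

lemma pvG_nonpos (cs : List Char) (t : Int) (h : t ≤ 0) : pvG cs t = (0, t) := by
  cases cs <;> simp [pvG, h]

lemma pvG_fst_nonneg (cs : List Char) : ∀ t, 0 ≤ (pvG cs t).1 := by
  induction cs with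
  | nil => intro t; simp [pvG]
  | cons a rest ih =>
    intro t
    by_cases ht : t ≤ 0
    · simp [pvG, ht]
    · have := ih (t - 1)
      by_cases hac : a = '\n' <;> simp [pvG, ht, hac] <;> omega

lemma alt_eq_pvG (cs : List Char) :
    ∀ (t : Int), t ≤ (cs.length : Int) →
    ((PySem.Chars.count (cs.take (max t 0).toNat) ['\n'] : Int),
      t - (PySem.Chars.rfind (cs.take (max t 0).toNat) ['\n'] + 1)) = pvG cs t := by
  induction cs with
  | nil =>
    intro t h
    simp [count_single, rfind_nil, pvG]
  | cons a rest ih =>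
    intro t h
    by_cases ht : t ≤ 0
    · have : (max t 0).toNat = 0 := by omega
      simp [this, count_single, rfind_nil, pvG, ht]
    · have hmax : (max t 0).toNat = t.toNat := by omega
      have htake : (a :: rest).take (max t 0).toNat = a :: rest.take (max (t-1) 0).toNat := by
        rw [hmax]
        have : t.toNat = ((max (t-1) 0).toNat) + 1 := by omega
        rw [this, List.take_succ_cons]
      have hrec := ih (t - 1) (by simp at h; omega)
      have h1 : (pvG rest (t-1)).1 = ((rest.take (max (t-1) 0).toNat).count '\n' : Int) := by
        rw [← hrec]; simp [count_single]
      have h2 : (pvG rest (t-1)).2 =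
          (t - 1) - (PySem.Chars.rfind (rest.take (max (t-1) 0).toNat) ['\n'] + 1) := by
        rw [← hrec]
      have hG : pvG (a :: rest) t =
          (if a = '\n' then ((pvG rest (t-1)).1 + 1, (pvG rest (t-1)).2)
           else ((pvG rest (t-1)).1,
             if (pvG rest (t-1)).1 = 0 then (pvG rest (t-1)).2 + 1 else (pvG rest (t-1)).2)) := by
        simp [pvG, ht]
      rw [htake, hG, count_single, List.count_cons, rfind_cons]
      rcases rfind_dichotomy '\n' (rest.take (max (t-1) 0).toNat) with ⟨hr, hm⟩ | ⟨hr, hm⟩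
      · have hcount : (rest.take (max (t-1) 0).toNat).count '\n' = 0 := List.count_eq_zero.mpr hm
        have hp1 : (pvG rest (t-1)).1 = 0 := by rw [h1, hcount]; simp
        rw [hr]
        by_cases hac : a = '\n'
        · rw [if_pos hac]
          refine Prod.ext ?_ ?_ <;> simp [h1, h2, hcount, hac, hr, hp1] <;> omega
        · rw [if_neg hac]
          have hbeq : (a == '\n') = false := by simp [hac]
          refine Prod.ext ?_ ?_ <;> simp [h1, h2, hcount, hbeq, hac, hr, hp1] <;> omega
      · have hcount : (rest.take (max (t-1) 0).toNat).count '\n' ≠ 0 := by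
          simpa [List.count_eq_zero] using hm
        have hp1 : (pvG rest (t-1)).1 ≠ 0 := by
          rw [h1]; exact_mod_cast fun hh => hcount (by exact_mod_cast hh)
        rw [if_pos hr]
        by_cases hac : a = '\n'
        · rw [if_pos hac]
          refine Prod.ext ?_ ?_ <;> simp [h1, h2, hcount, hac, hp1] <;> omega
        · rw [if_neg hac]
          have hbeq : (a == '\n') = false := by simp [hac]
          refine Prod.ext ?_ ?_ <;> simp [h1, h2, hcount, hbeq, hac, hp1] <;> omega

lemma loopA_eq_pvG (cs : List Char) :
    ∀ (cur : List Char) (n s t : Int), t - s - (cur.length : Int) ≤ (cs.length : Int) →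
      pvLoopA (PySem.List.enumerate (pvMySplit '\n' cs cur) n) s t =
        (n + (pvG cs (t - s - (cur.length : Int))).1,
         if (pvG cs (t - s - (cur.length : Int))).1 = 0
         then (pvG cs (t - s - (cur.length : Int))).2 + (cur.length : Int)
         else (pvG cs (t - s - (cur.length : Int))).2) := by
  induction cs with
  | nil =>
    intro cur n s t h
    simp only [List.length_nil, Int.natCast_zero] at h
    simp only [pvMySplit, PySem.List.enumerate_cons, PySem.List.enumerate_nil, pvLoopA]
    rw [pvG_nonpos [] _ h, if_pos (by simp only [List.length_reverse]; omega)]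
    refine Prod.ext (by simp) (by simp)
  | cons a rest ih =>
    intro cur n s t h
    by_cases hac : a = '\n'
    · subst hac
      simp only [pvMySplit, ite_true, PySem.List.enumerate_cons, pvLoopA]
      by_cases hts : s + ((List.reverse cur).length : Int) ≥ t
      · rw [if_pos hts, pvG_nonpos (_ :: rest) _
            (by simp only [List.length_reverse, ge_iff_le] at hts; omega)]
        simp
      · rw [if_neg hts]
        have hrec := ih [] (n + 1) (s + (cur.length : Int) + 1) t
          (by simp at h ⊢; omega)
        simp only [List.length_nil, Int.natCast_zero, List.length_reverse] at hrec ⊢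
        have harg : t - (s + (cur.length : Int) + 1) - 0 = t - s - (cur.length : Int) - 1 := by ring
        rw [harg] at hrec
        rw [hrec]
        have hgt : ¬ (t - s - (cur.length : Int) ≤ 0) := by
          simp only [List.length_reverse, ge_iff_le, not_le] at hts; omega
        have hG : pvG ('\n' :: rest) (t - s - (cur.length : Int)) =
            ((pvG rest (t - s - (cur.length : Int) - 1)).1 + 1,
             (pvG rest (t - s - (cur.length : Int) - 1)).2) := by
          simp [pvG, hgt]
        rw [hG]
        have hq := pvG_fst_nonneg rest (t - s - (cur.length : Int) - 1)
        have hne : (pvG rest (t - s - (cur.length : Int) - 1)).1 + 1 ≠ 0 := by omega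
        rw [if_neg hne]
        refine Prod.ext (by simp; ring) ?_
        split <;> simp
    · simp only [pvMySplit, if_neg hac]
      have hrec := ih (a :: cur) n s t (by simp at h ⊢; omega)
      simp only [List.length_cons] at hrec
      have harg : t - s - ((cur.length : Int) + 1) = t - s - (cur.length : Int) - 1 := by ring
      rw [show ((cur.length + 1 : Nat) : Int) = (cur.length : Int) + 1 by push_cast; ring, harg] at hrec
      rw [hrec]
      by_cases ht' : t - s - (cur.length : Int) ≤ 0
      · rw [pvG_nonpos rest _ (by omega), pvG_nonpos (a :: rest) _ ht']
        simp
      · have hG : pvG (a :: rest) (t - s - (cur.length : Int)) =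
            ((pvG rest (t - s - (cur.length : Int) - 1)).1,
             if (pvG rest (t - s - (cur.length : Int) - 1)).1 = 0
             then (pvG rest (t - s - (cur.length : Int) - 1)).2 + 1
             else (pvG rest (t - s - (cur.length : Int) - 1)).2) := by
          simp [pvG, ht', hac]
        rw [hG]
        by_cases hz : (pvG rest (t - s - (cur.length : Int) - 1)).1 = 0
        · simp [hz]; ring
        · simp [hz]

lemma ports_agree (text : String) (t : Int) (hpre : t ≤ (text.toList.length : Int)) :
    find_line_and_relative_position text t = find_line_and_relative_position_alt text t := by
  unfold find_line_and_relative_position find_line_and_relative_position_alt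
  rw [splitOn_single, loopA_eq_pvG text.toList [] 0 0 t (by simpa using hpre)]
  rw [PySem.List.slice_to _ (by omega : (0:Int) ≤ max t 0)]
  rw [show t - 0 - ((List.nil (α := Char)).length : Int) = t by simp]
  rw [← alt_eq_pvG text.toList t hpre]
  simp

-- ===== VERDICT (by name: the statement is the Claim_ definition above) =====
theorem find_line_and_relative_position_spec : Claim_equal_find_line_and_relative_position := by
  intro text target_position _hdom hpre
  unfold Spec_find_line_and_relative_position
  exact ports_agree text target_position hpre
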